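-- pv_equiv track=rewrite | github.com/KevinKuo149/Log-Parser | parser_priority.py | exclude_Parser
-- ===== SOURCE A (Python) =====
-- def exclude_Parser(log_dict, keyword_list):
--     re_log_dict = {}
--     for key in log_dict.keys():
--         temp_log = []
--         for index in range(len(log_dict[key])):
--             line = log_dict[key][index]
--             boolean = bool(1)
--             for one_keyword in keyword_list:
--                 if one_keyword in line:
--                     boolean = bool(0)
--                     break
--             if boolean == bool(1):
--                 temp_log.append(line)
--         if temp_log != []:
--             re_log_dict.update({key:temp_log})
--     return re_log_dict
-- ===== SOURCE B (Python) =====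
-- def exclude_Parser(log_dict, keyword_list):
--     # Sieve by keyword: for each key, repeatedly narrow the list of surviving
--     # lines, one filtering pass per keyword; keep the key only if lines survive.
--     result = {}
--     for key, lines in log_dict.items():
--         survivors = lines
--         for kw in keyword_list:
--             survivors = [line for line in survivors if kw not in line]
--         if survivors:
--             result[key] = survivors
--     return result
-- ===== Notes on version B (the rewrite author's own statement) =====
-- stated objective: alternative
-- what changed: B sieves each key's lines keyword-by-keyword (one whole-list filtering pass per keyword, progressively narrowing the surviving lines) over dict items, instead of A's per-line inner keyword loop with a boolean flag and break over keys and indices; Pre_ only excludes association lists with duplicate keys, which do not represent a Python dict.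
import Mathlib
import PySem

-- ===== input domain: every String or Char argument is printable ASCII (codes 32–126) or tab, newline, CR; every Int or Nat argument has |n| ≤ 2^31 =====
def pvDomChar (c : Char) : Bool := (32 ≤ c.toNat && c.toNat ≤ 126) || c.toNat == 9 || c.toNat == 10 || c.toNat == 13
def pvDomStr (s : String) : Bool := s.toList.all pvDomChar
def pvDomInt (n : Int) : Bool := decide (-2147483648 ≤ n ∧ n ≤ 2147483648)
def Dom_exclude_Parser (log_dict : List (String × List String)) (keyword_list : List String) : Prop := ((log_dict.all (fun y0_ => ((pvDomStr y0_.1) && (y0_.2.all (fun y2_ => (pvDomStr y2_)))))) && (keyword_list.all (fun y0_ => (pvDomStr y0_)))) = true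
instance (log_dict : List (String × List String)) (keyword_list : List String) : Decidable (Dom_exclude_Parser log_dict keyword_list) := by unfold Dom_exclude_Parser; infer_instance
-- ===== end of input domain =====

-- B sieves each key's lines keyword-by-keyword (one whole-list filtering pass per keyword)
-- over the dict items, instead of A's per-line keyword loop with a boolean flag and break
-- over keys and indices; same cost class, different traversal (objective: alternative).


-- ===== PORT A =====
-- inner 'for one_keyword … break' loop: once boolean is False it stays False and the loop body
-- can no longer change it, so the break-less fold below computes the same flag
def pyLineClean (keyword_list : List String) (line : String) : Bool :=
  keyword_list.foldl
    (fun boolean one_keyword => if PySem.Str.isIn one_keyword line then false else boolean) true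

def exclude_Parser (log_dict : List (String × List String)) (keyword_list : List String) :
    List (String × List String) :=
  -- for key in log_dict.keys(), log_dict[key] = first-match lookup in the association list
  ((log_dict.map (·.1)).foldl
    (fun (re_log_dict : PySem.Dict String (List String)) key =>
      let lines := ((log_dict.find? (fun p => p.1 == key)).map (·.2)).getD []
      let temp_log := (PySem.List.pyRange 0 (lines.length : Int)).foldl
        (fun temp_log index =>
          let line := PySem.List.pyGetD lines index ""
          if pyLineClean keyword_list line then temp_log ++ [line] else temp_log) []
      if temp_log ≠ [] then re_log_dict.insert key temp_log else re_log_dict)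
    PySem.Dict.empty).items

-- ===== PORT B =====
def exclude_Parser_alt (log_dict : List (String × List String)) (keyword_list : List String) :
    List (String × List String) :=
  (log_dict.foldl
    (fun (result : PySem.Dict String (List String)) kv =>
      -- survivors: one filtering pass per keyword, progressively narrowing kv.2
      let survivors := keyword_list.foldl
        (fun survivors kw => survivors.filter (fun line => !PySem.Str.isIn kw line)) kv.2
      if survivors ≠ [] then result.insert kv.1 survivors else result)
    PySem.Dict.empty).items

-- ===== PRECONDITION & SPEC =====
-- Pre_ excludes association lists with duplicate keys: they do not represent any Python dict
-- (A's per-key first-match lookup and re-insertion behaviour there is accidental).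
def Pre_exclude_Parser (log_dict : List (String × List String)) (keyword_list : List String) : Prop :=
  (log_dict.map Prod.fst).Nodup
instance (log_dict : List (String × List String)) (keyword_list : List String) : Decidable (Pre_exclude_Parser log_dict keyword_list) := by unfold Pre_exclude_Parser; infer_instance

def pvWitness_exclude_Parser : (List (String × List String)) × List String :=
  ([("app", ["ok line", "bad err"]), ("db", ["fine"])], ["err"])

def Spec_exclude_Parser (log_dict : List (String × List String)) (keyword_list : List String) (out : List (String × List String)) : Prop := out = exclude_Parser_alt log_dict keyword_list
instance (log_dict : List (String × List String)) (keyword_list : List String) (out : List (String × List String)) : Decidable (Spec_exclude_Parser log_dict keyword_list out) := by unfold Spec_exclude_Parser; infer_instance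

-- ===== CLAIM (what is proved, stated in full; the proofs are below) =====
def Claim_equal_exclude_Parser : Prop := ∀ (log_dict : List (String × List String)) (keyword_list : List String), Dom_exclude_Parser log_dict keyword_list → Pre_exclude_Parser log_dict keyword_list → Spec_exclude_Parser log_dict keyword_list (exclude_Parser log_dict keyword_list)

-- ===== LEMMAS AND PROOFS =====

-- A's per-line flag loop decides 'no keyword occurs in the line'
theorem clean_eq_all (ks : List String) (line : String) :
    pyLineClean ks line = ks.all (fun kw => !PySem.Str.isIn kw line) := by
  unfold pyLineClean
  rw [PySem.List.foldl_if_false_eq (fun kw => PySem.Str.isIn kw line)]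
  simp [List.all_eq_not_any_not]

-- B's keyword-by-keyword sieve of a line list is a single filter by 'no keyword occurs'
theorem sieve_eq_filter (ks : List String) (lines : List String) :
    ks.foldl (fun survivors kw => survivors.filter (fun line => !PySem.Str.isIn kw line)) lines
      = lines.filter (fun line => ks.all (fun kw => !PySem.Str.isIn kw line)) := by
  induction ks generalizing lines with
  | nil => simp
  | cons k t ih =>
    simp only [List.foldl_cons, ih, List.filter_filter]
    congr 1
    funext line
    simp [List.all_cons, Bool.and_comm]

-- A's index loop over one value list is a filter of that list
theorem temp_eq_kept (ks : List String) (lines : List String) :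
    (PySem.List.pyRange 0 (lines.length : Int)).foldl
      (fun temp_log index =>
        if pyLineClean ks (PySem.List.pyGetD lines index "") = true then
          temp_log ++ [PySem.List.pyGetD lines index ""]
        else temp_log) []
    = lines.filter (fun line => ks.all (fun kw => !PySem.Str.isIn kw line)) := by
  rw [PySem.List.foldl_append_if
    (fun index : Int => pyLineClean ks (PySem.List.pyGetD lines index ""))
    (fun index : Int => PySem.List.pyGetD lines index "")
    (PySem.List.pyRange 0 (lines.length : Int)) []]
  simp only [List.nil_append, PySem.List.pyRange_zero_natCast, List.filter_map, List.map_map,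
    Function.comp_def, PySem.List.pyGetD_natCast]
  have hmap : (List.range lines.length).map (fun k => lines.getD k "") = lines := by
    apply List.ext_getElem
    · simp
    · intro i h1 h2
      simp [List.getD_eq_getElem?_getD, List.getElem?_eq_getElem h2]
  conv_rhs => rw [← hmap]
  rw [List.filter_map]
  simp only [Function.comp_def, clean_eq_all]

-- A's fold over keys (looking each key up in d) equals B's fold over the pairs, keys nodup
theorem exclude_Parser_main (ks : List String) :
    ∀ (d : List (String × List String)) (acc : PySem.Dict String (List String)),
      (d.map Prod.fst).Nodup →
      List.foldl
        (fun re key =>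
          if (((d.find? (fun p => p.1 == key)).map (·.2)).getD []).filter
              (fun line => ks.all (fun kw => !PySem.Str.isIn kw line)) ≠ [] then
            re.insert key ((((d.find? (fun p => p.1 == key)).map (·.2)).getD []).filter
              (fun line => ks.all (fun kw => !PySem.Str.isIn kw line)))
          else re) acc (d.map (·.1))
      = List.foldl
        (fun res kv =>
          if kv.2.filter (fun line => ks.all (fun kw => !PySem.Str.isIn kw line)) ≠ [] then
            res.insert kv.1 (kv.2.filter (fun line => ks.all (fun kw => !PySem.Str.isIn kw line)))
          else res) acc d := by
  intro d
  induction d with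
  | nil => intro acc _; rfl
  | cons kv rest ih =>
    intro acc hnd
    simp only [List.map_cons, List.nodup_cons] at hnd
    obtain ⟨hk, hrest⟩ := hnd
    simp only [List.map_cons, List.foldl_cons]
    have hfind : ((kv :: rest).find? (fun p => p.1 == kv.1)) = some kv := by simp
    rw [hfind]
    simp only [Option.map_some, Option.getD_some]
    refine Eq.trans ?_ (ih _ hrest)
    apply PySem.List.foldl_congr_mem'
    intro key hkey acc''
    have hne : kv.1 ≠ key := by
      intro he
      exact hk (by rw [he]; simpa using hkey)
    have hf2 : List.find? (fun p => p.1 == key) (kv :: rest)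
        = List.find? (fun p => p.1 == key) rest := by
      simp [hne]
    rw [hf2]

-- ===== VERDICT (by name: the statement is the Claim_ definition above) =====
theorem exclude_Parser_spec : Claim_equal_exclude_Parser := by
  intro log_dict ks _ hpre
  unfold Spec_exclude_Parser exclude_Parser exclude_Parser_alt
  congr 1
  simp only [temp_eq_kept, sieve_eq_filter]
  exact exclude_Parser_main ks log_dict PySem.Dict.empty hpre
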